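-- pv_equiv track=rewrite | github.com/qiufengyuyi/sequence_tagging | data_processing/bert_mrc_prepare_data.py | find_tag_start_end_index
-- ===== SOURCE A (Python) =====
-- def find_tag_start_end_index(tag,label_list):
--     start_index_tag = [0] * len(label_list)
--     end_index_tag = [0] * len(label_list)
--     start_tag = "B-"+tag
--     end_tag = "I-"+tag
--     for i in range(len(start_index_tag)):
--         if label_list[i].upper() == start_tag:
--             # begin
--             start_index_tag[i] = 1
--         elif label_list[i].upper() == end_tag:
--             if i == len(start_index_tag)-1:
--                 # last tag
--                 end_index_tag[i] = 1
--             else: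
--                 if label_list[i+1].upper() != end_tag:
--                     end_index_tag[i] = 1
--     return start_index_tag,end_index_tag
-- ===== SOURCE B (Python) =====
-- def find_tag_start_end_index(tag, label_list):
--     # Run-length decomposition: split the uppercased labels into maximal runs of
--     # equal values, then emit a block per run (all-1 start block for a B-run,
--     # 0...0 1 end block for an I-run, zeros otherwise).
--     start_tag = "B-" + tag
--     end_tag = "I-" + tag
--     uppers = [lab.upper() for lab in label_list]
--     start_index_tag = []
--     end_index_tag = []
--     i = 0
--     n = len(uppers)
--     while i < n:
--         j = i + 1
--         while j < n and uppers[j] == uppers[i]: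
--             j += 1
--         run_len = j - i
--         v = uppers[i]
--         start_index_tag.extend([1] * run_len if v == start_tag else [0] * run_len)
--         if v == end_tag:
--             end_index_tag.extend([0] * (run_len - 1) + [1])
--         else:
--             end_index_tag.extend([0] * run_len)
--         i = j
--     return start_index_tag, end_index_tag
-- ===== Notes on version B (the rewrite author's own statement) =====
-- stated objective: alternative
-- what changed: Replaces A's per-index loop (with an i+1 lookahead and an explicit last-index special case, mutating two preallocated arrays) by a run-length decomposition: split the uppercased labels into maximal runs of equal values and emit one block per run (all-ones for a B-run, zeros-then-one for an I-run, zeros otherwise).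
import Mathlib
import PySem

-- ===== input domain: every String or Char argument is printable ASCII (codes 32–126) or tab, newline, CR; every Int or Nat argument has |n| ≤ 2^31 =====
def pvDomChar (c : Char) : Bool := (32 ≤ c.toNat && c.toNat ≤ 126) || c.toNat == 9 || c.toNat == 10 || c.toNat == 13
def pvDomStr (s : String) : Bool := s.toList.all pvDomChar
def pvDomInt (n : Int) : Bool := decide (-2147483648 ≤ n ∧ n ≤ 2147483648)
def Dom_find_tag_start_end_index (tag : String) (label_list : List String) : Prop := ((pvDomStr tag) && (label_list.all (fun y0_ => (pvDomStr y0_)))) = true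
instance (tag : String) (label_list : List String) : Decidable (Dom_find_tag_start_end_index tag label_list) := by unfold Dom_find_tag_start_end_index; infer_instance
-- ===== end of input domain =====

-- B replaces A's per-index loop with lookahead and last-index special case by a
-- run-length decomposition: split the uppercased labels into maximal runs and
-- emit one block per run (alternative decomposition, same O(n) cost).

-- ===== PORT A =====
-- the 'for i in range(len(start_index_tag))' loop of A, as structural recursion on i;
-- indexing uses pyGetD with default "" — every access is in range, so this is exact
def loopA (start_tag end_tag : String) (ll : List String) (i : Nat) (s e : List Int) :
    List Int × List Int :=
  if h : i < ll.length then
    let u := PySem.Str.upper (PySem.List.pyGetD ll (i : Int) "")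
    if u = start_tag then
      loopA start_tag end_tag ll (i+1) (PySem.List.pySetD s (i : Int) 1) e
    else if u = end_tag then
      if i = ll.length - 1 then
        loopA start_tag end_tag ll (i+1) s (PySem.List.pySetD e (i : Int) 1)
      else if PySem.Str.upper (PySem.List.pyGetD ll ((i : Int)+1) "") ≠ end_tag then
        loopA start_tag end_tag ll (i+1) s (PySem.List.pySetD e (i : Int) 1)
      else
        loopA start_tag end_tag ll (i+1) s e
    else
      loopA start_tag end_tag ll (i+1) s e
  else (s, e)
termination_by ll.length - i

def find_tag_start_end_index (tag : String) (label_list : List String) : List Int × List Int :=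
  let start_index_tag : List Int := List.replicate label_list.length 0
  let end_index_tag : List Int := List.replicate label_list.length 0
  let start_tag := "B-" ++ tag
  let end_tag := "I-" ++ tag
  loopA start_tag end_tag label_list 0 start_index_tag end_index_tag

-- ===== PORT B =====
-- Source B's outer while loop over maximal runs: each step peels one maximal run
-- (the inner 'while j < n and uppers[j] == uppers[i]' is takeWhile/dropWhile on
-- the tail) and appends the run's start/end blocks before recursing on the rest
def loopB (start_tag end_tag : String) (l : List String) : List Int × List Int :=
  match l with
  | [] => ([], [])
  | x :: xs =>
    let run_len := (xs.takeWhile (fun y => y = x)).length + 1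
    let rest := xs.dropWhile (fun y => y = x)
    let se := loopB start_tag end_tag rest
    ((if x = start_tag then List.replicate run_len (1 : Int) else List.replicate run_len 0) ++ se.1,
     (if x = end_tag then List.replicate (run_len - 1) (0 : Int) ++ [1]
      else List.replicate run_len 0) ++ se.2)
termination_by l.length
decreasing_by
  have := List.length_dropWhile_le (p := fun y => y = x) (l := xs)
  simp only [List.length_cons]; omega

def find_tag_start_end_index_alt (tag : String) (label_list : List String) : List Int × List Int :=
  let start_tag := "B-" ++ tag
  let end_tag := "I-" ++ tag
  let uppers := label_list.map PySem.Str.upper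
  loopB start_tag end_tag uppers

-- ===== PRECONDITION & SPEC =====
def Spec_find_tag_start_end_index (tag : String) (label_list : List String) (out : List Int × List Int) : Prop := out = find_tag_start_end_index_alt tag label_list
instance (tag : String) (label_list : List String) (out : List Int × List Int) : Decidable (Spec_find_tag_start_end_index tag label_list out) := by unfold Spec_find_tag_start_end_index; infer_instance

-- ===== CLAIM (what is proved, stated in full; the proofs are below) =====
def Claim_equal_find_tag_start_end_index : Prop := ∀ (tag : String) (label_list : List String), Dom_find_tag_start_end_index tag label_list → Spec_find_tag_start_end_index tag label_list (find_tag_start_end_index tag label_list)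

-- ===== LEMMAS AND PROOFS =====

-- common characterisation of both results, over the uppercased list
def startSpec (t : String) (l : List String) : List Int :=
  l.map (fun u => if u = t then 1 else 0)

def endSpec (t : String) : List String → List Int
  | [] => []
  | [x] => [if x = t then 1 else 0]
  | x :: y :: xs => (if x = t ∧ y ≠ t then (1 : Int) else 0) :: endSpec t (y :: xs)

theorem string_append_ne (a b tag tag' : String) (h : a.toList ≠ b.toList ∧ (a.toList).length = (b.toList).length) :
    a ++ tag ≠ b ++ tag' := by
  intro hc
  have := congrArg String.toList hc
  simp only [String.toList_append] at this
  exact h.1 (List.append_inj_left this h.2)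

theorem set_append_len {p r : List Int} {v : Int} :
    (p ++ r).set p.length v = p ++ r.set 0 v := by
  simpa using List.set_append_right (l₁ := p) (l₂ := r) (n := p.length) (a := v) (le_refl _)

theorem loopA_spec (st et : String) (ll : List String) (hne : st ≠ et) :
    ∀ (m i : Nat) (p q : List Int), m = ll.length - i → p.length = i → q.length = i →
      loopA st et ll i (p ++ List.replicate m 0) (q ++ List.replicate m 0) =
        (p ++ startSpec st ((ll.map PySem.Str.upper).drop i),
         q ++ endSpec et ((ll.map PySem.Str.upper).drop i)) := by
  intro m
  induction m with
  | zero =>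
    intro i p q hm hp hq
    have hin : ¬ i < ll.length := by omega
    have hle : ll.length ≤ i := by omega
    rw [loopA, List.drop_eq_nil_of_le (by simpa using hle)]
    simp [hin, hle, startSpec, endSpec]
  | succ m IH =>
    intro i p q hm hp hq
    have hin : i < ll.length := by omega
    have hgd : PySem.List.pyGetD ll (i : Int) "" = ll[i] := by
      simp [PySem.List.pyGetD_natCast, List.getD_eq_getElem?_getD, hin]
    have hdrop : (ll.map PySem.Str.upper).drop i =
        PySem.Str.upper ll[i] :: (ll.map PySem.Str.upper).drop (i+1) := by
      rw [List.drop_eq_getElem_cons (by simpa using hin)]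
      simp
    have hrep : (List.replicate (m+1) (0:Int)) = 0 :: List.replicate m 0 := rfl
    have hsetp : ∀ r : List Int, (p ++ r).set i 1 = p ++ r.set 0 1 := by
      intro r; rw [← hp]; exact set_append_len
    have hsetq : ∀ r : List Int, (q ++ r).set i 1 = q ++ r.set 0 1 := by
      intro r; rw [← hq]; exact set_append_len
    have hm' : m = ll.length - (i+1) := by omega
    rw [loopA]
    simp only [hin, dite_true, hgd]
    by_cases hst : PySem.Str.upper ll[i] = st
    · -- start branch
      simp only [hst, if_true]
      rw [PySem.List.pySetD_natCast, hrep, hsetp]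
      have : (0 :: List.replicate m (0:Int)).set 0 1 = 1 :: List.replicate m 0 := rfl
      rw [this,
        show p ++ 1 :: List.replicate m (0:Int) = (p ++ [1]) ++ List.replicate m 0 by simp,
        show q ++ 0 :: List.replicate m (0:Int) = (q ++ [0]) ++ List.replicate m 0 by simp,
        IH (i+1) (p ++ [1]) (q ++ [0]) hm' (by simp [hp]) (by simp [hq]),
        hdrop]
      have hxet : ¬ (PySem.Str.upper ll[i] = et) := by rw [hst]; exact hne
      rcases Nat.lt_or_ge (i+1) ll.length with hlt | hge
      · rw [List.drop_eq_getElem_cons (i := i+1) (by simpa using hlt)]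
        simp [startSpec, endSpec, hst, hxet, hne]
      · rw [List.drop_eq_nil_of_le (by simpa using hge)]
        simp [startSpec, endSpec, hst, hxet, hne]
    · simp only [hst, if_false]
      by_cases het : PySem.Str.upper ll[i] = et
      · have hets : ¬ et = st := fun h => hst (h ▸ het)
        simp only [het, if_true]
        by_cases hlast : i = ll.length - 1
        · have hge : ll.length ≤ i + 1 := by omega
          simp only [hlast, if_true]
          rw [PySem.List.pySetD_natCast, ← hlast, hrep, hsetq,
            show (0 :: List.replicate m (0:Int)).set 0 1 = 1 :: List.replicate m 0 from rfl,
            show p ++ 0 :: List.replicate m (0:Int) = (p ++ [0]) ++ List.replicate m 0 by simp,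
            show q ++ 1 :: List.replicate m (0:Int) = (q ++ [1]) ++ List.replicate m 0 by simp,
            IH (i+1) (p ++ [0]) (q ++ [1]) hm' (by simp [hp]) (by simp [hq]),
            hdrop, List.drop_eq_nil_of_le (by simpa using hge)]
          simp [startSpec, endSpec, hets, hst, het]
        · have hlt : i + 1 < ll.length := by omega
          have hgd' : PySem.List.pyGetD ll ((i : Int)+1) "" = ll[i+1] := by
            have h1 : ((i : Int) + 1) = ((i+1 : Nat) : Int) := by push_cast; ring
            rw [h1, PySem.List.pyGetD_natCast]
            simp [List.getD_eq_getElem?_getD, hlt]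
          have hdrop' : (ll.map PySem.Str.upper).drop (i+1) =
              PySem.Str.upper ll[i+1] :: (ll.map PySem.Str.upper).drop (i+2) := by
            rw [List.drop_eq_getElem_cons (by simpa using hlt)]
            simp
          simp only [hlast, if_false, hgd']
          by_cases hnx : PySem.Str.upper ll[i+1] = et
          · simp only [hnx, ne_eq, not_true_eq_false, if_false]
            rw [hrep,
              show p ++ 0 :: List.replicate m (0:Int) = (p ++ [0]) ++ List.replicate m 0 by simp,
              show q ++ 0 :: List.replicate m (0:Int) = (q ++ [0]) ++ List.replicate m 0 by simp,
              IH (i+1) (p ++ [0]) (q ++ [0]) hm' (by simp [hp]) (by simp [hq]),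
              hdrop, hdrop']
            simp [startSpec, endSpec, hets, hst, het, hnx]
          · simp only [hnx, ne_eq, not_false_eq_true, if_true]
            rw [PySem.List.pySetD_natCast, hrep, hsetq,
              show (0 :: List.replicate m (0:Int)).set 0 1 = 1 :: List.replicate m 0 from rfl,
              show p ++ 0 :: List.replicate m (0:Int) = (p ++ [0]) ++ List.replicate m 0 by simp,
              show q ++ 1 :: List.replicate m (0:Int) = (q ++ [1]) ++ List.replicate m 0 by simp,
              IH (i+1) (p ++ [0]) (q ++ [1]) hm' (by simp [hp]) (by simp [hq]),
              hdrop, hdrop']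
            simp [startSpec, endSpec, hets, hst, het, hnx]
      · simp only [het, if_false]
        rw [hrep,
          show p ++ 0 :: List.replicate m (0:Int) = (p ++ [0]) ++ List.replicate m 0 by simp,
          show q ++ 0 :: List.replicate m (0:Int) = (q ++ [0]) ++ List.replicate m 0 by simp,
          IH (i+1) (p ++ [0]) (q ++ [0]) hm' (by simp [hp]) (by simp [hq]),
          hdrop]
        rcases Nat.lt_or_ge (i+1) ll.length with hlt | hge
        · rw [List.drop_eq_getElem_cons (i := i+1) (by simpa using hlt)]
          simp [startSpec, endSpec, hst, het]
        · rw [List.drop_eq_nil_of_le (by simpa using hge)]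
          simp [startSpec, endSpec, hst, het]

-- startSpec over a maximal run x^(k) followed by the rest
theorem startSpec_run (st x : String) (k : Nat) (rest : List String) :
    startSpec st (List.replicate k x ++ rest) =
      (if x = st then List.replicate k (1 : Int) else List.replicate k 0) ++ startSpec st rest := by
  simp only [startSpec, List.map_append, List.map_replicate]
  by_cases h : x = st <;> simp [h]

-- endSpec over a maximal run: the boundary element differs from x
theorem endSpec_run (et x : String) (k : Nat) (rest : List String)
    (hrest : ∀ y, rest.head? = some y → y ≠ x) :
    endSpec et (List.replicate (k+1) x ++ rest) =
      (if x = et then List.replicate k (0 : Int) ++ [1] else List.replicate (k+1) 0) ++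
        endSpec et rest := by
  induction k with
  | zero =>
    cases rest with
    | nil => by_cases h : x = et <;> simp [endSpec, h]
    | cons y ys =>
      have hy : y ≠ x := hrest y rfl
      by_cases h : x = et
      · have : y ≠ et := fun hc => hy (by rw [hc, h])
        simp [endSpec, h, this]
      · simp [endSpec, h]
  | succ k IH =>
    have h2 : List.replicate (k+1+1) x ++ rest = x :: x :: (List.replicate k x ++ rest) := by
      simp [List.replicate_succ]
    rw [h2, endSpec]
    have h3 : x :: (List.replicate k x ++ rest) = List.replicate (k+1) x ++ rest := by
      simp [List.replicate_succ]
    rw [h3, IH]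
    by_cases h : x = et <;> simp [h, List.replicate_succ]

theorem loopB_spec_aux (st et : String) :
    ∀ (n : Nat) (l : List String), l.length ≤ n →
      loopB st et l = (startSpec st l, endSpec et l) := by
  intro n
  induction n with
  | zero =>
    intro l hl
    have : l = [] := by cases l <;> simp_all
    subst this
    simp [loopB, startSpec, endSpec]
  | succ n IH =>
    intro l hl
    cases l with
    | nil => simp [loopB, startSpec, endSpec]
    | cons x xs =>
      have hlen := List.length_dropWhile_le (p := fun y => y = x) (l := xs)
      have hrest := IH (xs.dropWhile (fun y => y = x)) (by simp at hl; omega)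
      have htw : xs.takeWhile (fun y => y = x) =
          List.replicate (xs.takeWhile (fun y => y = x)).length x := by
        apply List.eq_replicate_of_mem
        intro y hy
        have := List.mem_takeWhile_imp hy
        simpa using this
      have hhead : ∀ y, (xs.dropWhile (fun y => y = x)).head? = some y → y ≠ x := by
        intro y hy
        have := List.head?_dropWhile_not (p := fun y => y = x) (l := xs)
        rw [hy] at this
        simpa using this
      have hl2 : x :: xs =
          List.replicate ((xs.takeWhile (fun y => y = x)).length + 1) x ++
            xs.dropWhile (fun y => y = x) := by
        rw [List.replicate_succ]
        conv_lhs => rw [show xs = xs.takeWhile (fun y => y = x) ++ xs.dropWhile (fun y => y = x) from (List.takeWhile_append_dropWhile).symm]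
        conv_lhs => rw [htw]
        simp
      rw [loopB]
      simp only [hrest]
      conv_rhs => rw [hl2]
      rw [startSpec_run,
        endSpec_run et x ((xs.takeWhile (fun y => y = x)).length)
          (xs.dropWhile (fun y => y = x)) hhead]
      simp

theorem loopB_spec (st et : String) (l : List String) :
    loopB st et l = (startSpec st l, endSpec et l) :=
  loopB_spec_aux st et l.length l (le_refl _)

theorem find_tag_start_end_index_eq (tag : String) (label_list : List String) :
    find_tag_start_end_index tag label_list = find_tag_start_end_index_alt tag label_list := by
  have hne : ("B-" ++ tag) ≠ ("I-" ++ tag) := string_append_ne _ _ _ _ (by decide)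
  unfold find_tag_start_end_index find_tag_start_end_index_alt
  have h0 := loopA_spec ("B-" ++ tag) ("I-" ++ tag) label_list hne label_list.length 0 [] []
    (by omega) rfl rfl
  simp only [List.nil_append, List.drop_zero] at h0
  rw [h0, loopB_spec]

-- ===== VERDICT (by name: the statement is the Claim_ definition above) =====
theorem find_tag_start_end_index_spec : Claim_equal_find_tag_start_end_index := by
  intro tag label_list _
  exact find_tag_start_end_index_eq tag label_list
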